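-- pv_equiv track=rewrite | github.com/AltumSpatium/Labs | 7 semester/SAaRO/Lab5/mp.py | build_cycle
-- ===== SOURCE A (Python) =====
-- def build_cycle(U_bc):
--     result = U_bc[:]
--
--     while True:
--         found = False
--         for arc in U_bc:
--             U_sc = [arc[0] for arc in result]
--             U_ec = [arc[1] for arc in result]
--             i, j = arc
--             if (U_sc + U_ec).count(i) == 1 or (U_sc + U_ec).count(j) == 1:
--                 if arc in result:
--                     result.remove(arc)
--                 found = True
--         if not found:
--             break
--
--     return result
-- ===== SOURCE B (Python) =====
-- def build_cycle(U_bc):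
--     result = list(U_bc)
--     while True:
--         deg = {}
--         for i, j in result:
--             deg[i] = deg.get(i, 0) + 1
--             deg[j] = deg.get(j, 0) + 1
--         target = None
--         for arc in result:
--             if deg[arc[0]] == 1 or deg[arc[1]] == 1:
--                 target = arc
--                 break
--         if target is None:
--             return result
--         result.remove(target)
-- ===== Notes on version B (the rewrite author's own statement) =====
-- stated objective: faster
-- what changed: A repeatedly sweeps the ORIGINAL arc list, rebuilding the start/end lists and calling .count on their concatenation for every arc of every sweep; B instead loops remove-one-arc-at-a-time: it builds a degree dictionary once per removal and deletes the first arc of the current result with a degree-1 endpoint.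
import Mathlib
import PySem

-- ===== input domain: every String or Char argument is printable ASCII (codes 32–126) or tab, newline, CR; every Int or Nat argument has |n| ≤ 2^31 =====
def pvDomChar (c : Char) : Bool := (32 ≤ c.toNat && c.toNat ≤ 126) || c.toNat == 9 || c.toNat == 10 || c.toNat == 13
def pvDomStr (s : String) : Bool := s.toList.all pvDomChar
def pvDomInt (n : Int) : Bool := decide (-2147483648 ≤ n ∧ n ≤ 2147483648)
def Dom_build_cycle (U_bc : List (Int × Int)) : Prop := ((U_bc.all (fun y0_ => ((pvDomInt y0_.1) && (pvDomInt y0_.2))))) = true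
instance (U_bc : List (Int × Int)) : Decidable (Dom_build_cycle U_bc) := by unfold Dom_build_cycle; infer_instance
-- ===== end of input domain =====

-- B replaces A's repeated sweeps of the original list (with .count over freshly concatenated
-- endpoint lists per arc) by a remove-one-arc-at-a-time loop with a degree dictionary built
-- once per removal (objective: faster).

-- ===== PORT A =====
-- one iteration of A's inner `for arc in U_bc` body, acting on the state (result, found)
def stepA (st : List (Int × Int) × Bool) (arc : Int × Int) : List (Int × Int) × Bool :=
  let U_sc := st.1.map Prod.fst
  let U_ec := st.1.map Prod.snd
  if (U_sc ++ U_ec).count arc.1 = 1 ∨ (U_sc ++ U_ec).count arc.2 = 1 then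
    (if arc ∈ st.1 then st.1.erase arc else st.1, true)
  else st

-- A's `while True` loop; fuel-bounded, the proofs show fuel `U_bc.length + 2` is never exhausted
def buildLoopA (U : List (Int × Int)) : Nat → List (Int × Int) → List (Int × Int)
  | 0, r => r
  | fuel + 1, r =>
    if (U.foldl stepA (r, false)).2 then buildLoopA U fuel (U.foldl stepA (r, false)).1
    else (U.foldl stepA (r, false)).1

def build_cycle (U_bc : List (Int × Int)) : List (Int × Int) :=
  buildLoopA U_bc (U_bc.length + 2) U_bc

-- ===== PORT B =====
-- Source B: deg = {}; for i, j in result: deg[i] = deg.get(i, 0) + 1; deg[j] = deg.get(j, 0) + 1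
def degOf (r : List (Int × Int)) : PySem.Dict Int Int :=
  r.foldl (fun d a =>
    let d1 := d.insert a.1 (d.getD a.1 0 + 1)
    d1.insert a.2 (d1.getD a.2 0 + 1)) PySem.Dict.empty

-- Source B's `while True` loop: find the first arc with a degree-1 endpoint, remove it, repeat.
-- `deg[arc[0]]` is ported as `getD _ 0`, exact here since every looked-up key is an endpoint
-- of an arc of r and hence present in the dictionary.  Fuel-bounded: each round removes one
-- arc, so fuel `U_bc.length + 1` is never exhausted (proved below).
def loopB : Nat → List (Int × Int) → List (Int × Int)
  | 0, r => r
  | fuel + 1, r =>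
    match r.find? (fun a => (degOf r).getD a.1 0 == 1 || (degOf r).getD a.2 0 == 1) with
    | none => r
    | some t => loopB fuel (r.erase t)

def build_cycle_alt (U_bc : List (Int × Int)) : List (Int × Int) :=
  loopB (U_bc.length + 1) U_bc

-- ===== PRECONDITION & SPEC =====
def Spec_build_cycle (U_bc : List (Int × Int)) (out : List (Int × Int)) : Prop := out = build_cycle_alt U_bc
instance (U_bc : List (Int × Int)) (out : List (Int × Int)) : Decidable (Spec_build_cycle U_bc out) := by unfold Spec_build_cycle; infer_instance

-- ===== CLAIM (what is proved, stated in full; the proofs are below) =====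
def Claim_equal_build_cycle : Prop := ∀ (U_bc : List (Int × Int)), Dom_build_cycle U_bc → Spec_build_cycle U_bc (build_cycle U_bc)

-- ===== LEMMAS AND PROOFS =====

-- contribution of one arc to the degree of node v (a self-loop contributes 2)
def cont (a : Int × Int) (v : Int) : Nat :=
  (if a.1 = v then 1 else 0) + (if a.2 = v then 1 else 0)

def deg (r : List (Int × Int)) (v : Int) : Nat := (r.map (fun a => cont a v)).sum

-- the common leaf-stripping step: remove (the first occurrence of) an arc with a degree-1 endpoint
def Step (r r' : List (Int × Int)) : Prop :=
  ∃ a, a ∈ r ∧ (deg r a.1 = 1 ∨ deg r a.2 = 1) ∧ r' = r.erase a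

def Terminal (r : List (Int × Int)) : Prop := ∀ v, deg r v ≠ 1

theorem deg_nil (v : Int) : deg [] v = 0 := rfl

theorem deg_cons (a : Int × Int) (r : List (Int × Int)) (v : Int) :
    deg (a :: r) v = cont a v + deg r v := by simp [deg]

-- bridge to A's condition
theorem count_endpoints (r : List (Int × Int)) (v : Int) :
    (r.map Prod.fst ++ r.map Prod.snd).count v = deg r v := by
  induction r with
  | nil => rfl
  | cons a t ih =>
    simp only [List.map_cons, List.count_append, List.count_cons, deg_cons, cont,
      beq_iff_eq]
    simp only [List.count_append] at ih
    split_ifs <;> omega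

theorem cont_le_deg {a : Int × Int} {r : List (Int × Int)} (h : a ∈ r) (v : Int) :
    cont a v ≤ deg r v := by
  induction r with
  | nil => simp at h
  | cons b t ih =>
    rcases List.mem_cons.1 h with rfl | h
    · simp [deg_cons]
    · have := ih h; simp [deg_cons]; omega

theorem deg_erase {a : Int × Int} {r : List (Int × Int)} (h : a ∈ r) (v : Int) :
    deg r v = cont a v + deg (r.erase a) v := by
  induction r with
  | nil => simp at h
  | cons b t ih =>
    by_cases hb : b = a
    · subst hb; simp [List.erase_cons_head, deg_cons]
    · rw [List.erase_cons_tail (by simpa using hb)]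
      rcases List.mem_cons.1 h with h' | h'
      · exact absurd h'.symm hb
      · rw [deg_cons, deg_cons, ih h']; omega

theorem deg_pos_mem {r : List (Int × Int)} {v : Int} (h : deg r v ≠ 0) :
    ∃ a ∈ r, a.1 = v ∨ a.2 = v := by
  induction r with
  | nil => simp [deg_nil] at h
  | cons b t ih =>
    rw [deg_cons] at h
    by_cases hc : cont b v = 0
    · rcases ih (by omega) with ⟨a, ha, he⟩
      exact ⟨a, List.mem_cons_of_mem _ ha, he⟩
    · refine ⟨b, List.mem_cons_self, ?_⟩
      unfold cont at hc
      rcases eq_or_ne b.1 v with h1 | h1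
      · exact Or.inl h1
      · rcases eq_or_ne b.2 v with h2 | h2
        · exact Or.inr h2
        · simp [h1, h2] at hc

theorem cont_fst (a : Int × Int) : 1 ≤ cont a a.1 := by
  unfold cont; split <;> omega

theorem cont_snd (a : Int × Int) : 1 ≤ cont a a.2 := by
  unfold cont; simp

theorem step_length {r r' : List (Int × Int)} (h : Step r r') :
    r'.length + 1 = r.length := by
  rcases h with ⟨a, ha, _, rfl⟩
  have := List.length_erase_of_mem ha
  have : 0 < r.length := List.length_pos_of_mem ha
  omega

theorem step_subset {r r' : List (Int × Int)} (h : Step r r') : r' ⊆ r := by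
  rcases h with ⟨a, _, _, rfl⟩; exact List.erase_subset

theorem reach_subset {r r' : List (Int × Int)} (h : Relation.ReflTransGen Step r r') : r' ⊆ r := by
  induction h with
  | refl => exact fun _ h => h
  | tail _ h2 ih => exact fun x hx => ih (step_subset h2 hx)

theorem terminal_no_step {r r' : List (Int × Int)} (ht : Terminal r) : ¬ Step r r' := by
  rintro ⟨a, _, hc, _⟩
  rcases hc with hc | hc
  · exact ht a.1 hc
  · exact ht a.2 hc

theorem exists_terminal (r : List (Int × Int)) :
    ∃ t, Relation.ReflTransGen Step r t ∧ Terminal t := by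
  by_cases ht : Terminal r
  · exact ⟨r, Relation.ReflTransGen.refl, ht⟩
  · have ⟨v, hv⟩ : ∃ v, deg r v = 1 := by
      unfold Terminal at ht; push Not at ht; exact ht
    rcases deg_pos_mem (by omega : deg r v ≠ 0) with ⟨a, ha, he⟩
    have hs : Step r (r.erase a) := by
      refine ⟨a, ha, ?_, rfl⟩
      rcases he with he | he
      · exact Or.inl (he ▸ hv)
      · exact Or.inr (he ▸ hv)
    have hlen : (r.erase a).length < r.length := by
      have := step_length hs; omega
    rcases exists_terminal (r.erase a) with ⟨t, h1, h2⟩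
    exact ⟨t, Relation.ReflTransGen.head hs h1, h2⟩
termination_by r.length

theorem diamond {r r1 r2 : List (Int × Int)} (h1 : Step r r1) (h2 : Step r r2) :
    r1 = r2 ∨ ∃ r3, Step r1 r3 ∧ Step r2 r3 := by
  rcases h1 with ⟨a, ha, hca, rfl⟩
  rcases h2 with ⟨b, hb, hcb, rfl⟩
  by_cases hab : a = b
  · subst hab; exact Or.inl rfl
  · right
    -- the degree-1 endpoint of an arc c with c ∈ r, other ≠ c
    have key : ∀ c d : Int × Int, c ∈ r → d ∈ r → d ≠ c →
        (deg r c.1 = 1 ∨ deg r c.2 = 1) → c ∈ r.erase d ∧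
        (deg (r.erase d) c.1 = 1 ∨ deg (r.erase d) c.2 = 1) := by
      intro c d hc hd hdc hcond
      have hcmem : c ∈ r.erase d := (List.mem_erase_of_ne (fun h => hdc h.symm)).2 hc
      refine ⟨hcmem, ?_⟩
      rcases hcond with hcond | hcond
      · left
        have h1 : cont c c.1 ≤ deg (r.erase d) c.1 := cont_le_deg hcmem c.1
        have h2 := deg_erase hd c.1
        have := cont_fst c
        omega
      · right
        have h1 : cont c c.2 ≤ deg (r.erase d) c.2 := cont_le_deg hcmem c.2
        have h2 := deg_erase hd c.2
        have := cont_snd c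
        omega
    refine ⟨(r.erase a).erase b, ?_, ?_⟩
    · rcases key b a hb ha hab hcb with ⟨hm, hc⟩
      exact ⟨b, hm, hc, rfl⟩
    · rcases key a b ha hb (Ne.symm hab) hca with ⟨hm, hc⟩
      exact ⟨a, hm, hc, by rw [List.erase_comm]⟩

theorem confluence : ∀ n : Nat, ∀ r s1 s2 : List (Int × Int), r.length ≤ n →
    Relation.ReflTransGen Step r s1 → Relation.ReflTransGen Step r s2 →
    Terminal s1 → Terminal s2 → s1 = s2 := by
  intro n
  induction n with
  | zero =>
    intro r s1 s2 hlen h1 h2 t1 t2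
    rcases h1.cases_head with rfl | ⟨c, hc, _⟩
    · rcases h2.cases_head with rfl | ⟨c, hc, _⟩
      · rfl
      · rcases hc with ⟨a, ha, _, _⟩
        have := List.length_pos_of_mem ha; omega
    · rcases hc with ⟨a, ha, _, _⟩
      have := List.length_pos_of_mem ha; omega
  | succ n ih =>
    intro r s1 s2 hlen h1 h2 t1 t2
    rcases h1.cases_head with rfl | ⟨c1, hc1, h1'⟩
    · rcases h2.cases_head with rfl | ⟨c2, hc2, _⟩
      · rfl
      · exact absurd hc2 (terminal_no_step t1)
    · rcases h2.cases_head with rfl | ⟨c2, hc2, h2'⟩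
      · exact absurd hc1 (terminal_no_step t2)
      · have hl1 : c1.length ≤ n := by have := step_length hc1; omega
        have hl2 : c2.length ≤ n := by have := step_length hc2; omega
        rcases diamond hc1 hc2 with heq | ⟨r3, h13, h23⟩
        · exact ih c1 s1 s2 hl1 h1' (heq ▸ h2') t1 t2
        · rcases exists_terminal r3 with ⟨t, hrt, htt⟩
          have e1 : s1 = t :=
            ih c1 s1 t hl1 h1' (Relation.ReflTransGen.head h13 hrt) t1 htt
          have e2 : s2 = t :=
            ih c2 s2 t hl2 h2' (Relation.ReflTransGen.head h23 hrt) t2 htt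
          rw [e1, e2]

theorem nf_unique {U s1 s2 : List (Int × Int)}
    (h1 : Relation.ReflTransGen Step U s1) (h2 : Relation.ReflTransGen Step U s2)
    (t1 : Terminal s1) (t2 : Terminal s2) : s1 = s2 :=
  confluence U.length U s1 s2 le_rfl h1 h2 t1 t2

-- ---- analysis of port A ----

-- A's per-arc condition, rewritten through count_endpoints
theorem stepA_eq (st : List (Int × Int) × Bool) (arc : Int × Int) :
    stepA st arc =
      if deg st.1 arc.1 = 1 ∨ deg st.1 arc.2 = 1 then
        (if arc ∈ st.1 then st.1.erase arc else st.1, true)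
      else st := by
  unfold stepA
  simp only [count_endpoints]

theorem foldA_reach : ∀ (U : List (Int × Int)) (st : List (Int × Int) × Bool),
    Relation.ReflTransGen Step st.1 (U.foldl stepA st).1 := by
  intro U
  induction U with
  | nil => intro st; exact Relation.ReflTransGen.refl
  | cons arc U ih =>
    intro st
    have hstep : Relation.ReflTransGen Step st.1 (stepA st arc).1 := by
      rw [stepA_eq]
      split_ifs with h1 h2
      · exact Relation.ReflTransGen.single ⟨arc, h2, h1, rfl⟩
      · exact Relation.ReflTransGen.refl
      · exact Relation.ReflTransGen.refl
    exact hstep.trans (ih (stepA st arc))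

theorem foldA_true : ∀ (U : List (Int × Int)) (st : List (Int × Int) × Bool),
    st.2 = true → (U.foldl stepA st).2 = true := by
  intro U
  induction U with
  | nil => intro st h; exact h
  | cons arc U ih =>
    intro st h
    apply ih
    rw [stepA_eq]
    split_ifs <;> simp [h]

theorem foldA_false : ∀ (U : List (Int × Int)) (st : List (Int × Int) × Bool),
    (U.foldl stepA st).2 = false →
    U.foldl stepA st = st ∧ ∀ arc ∈ U, ¬(deg st.1 arc.1 = 1 ∨ deg st.1 arc.2 = 1) := by
  intro U
  induction U with
  | nil => intro st _; exact ⟨rfl, by simp⟩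
  | cons arc U ih =>
    intro st h
    simp only [List.foldl_cons] at h ⊢
    have hcond : ¬(deg st.1 arc.1 = 1 ∨ deg st.1 arc.2 = 1) := by
      intro hc
      have : (stepA st arc).2 = true := by rw [stepA_eq]; simp [hc]
      rw [foldA_true U _ this] at h; simp at h
    have hid : stepA st arc = st := by rw [stepA_eq]; simp [hcond]
    rw [hid] at h ⊢
    rcases ih st h with ⟨h1, h2⟩
    refine ⟨h1, ?_⟩
    intro a ha
    rcases List.mem_cons.1 ha with rfl | ha
    · exact hcond
    · exact h2 a ha

theorem stepA_len_le (st : List (Int × Int) × Bool) (arc : Int × Int) :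
    (stepA st arc).1.length ≤ st.1.length := by
  rw [stepA_eq]
  split_ifs
  · exact List.length_erase_le
  · exact le_rfl
  · exact le_rfl

theorem foldA_len_le : ∀ (U : List (Int × Int)) (st : List (Int × Int) × Bool),
    (U.foldl stepA st).1.length ≤ st.1.length := by
  intro U
  induction U with
  | nil => intro st; exact le_rfl
  | cons arc U ih =>
    intro st
    exact le_trans (ih (stepA st arc)) (stepA_len_le st arc)

theorem foldA_frozen : ∀ (U : List (Int × Int)) (st : List (Int × Int) × Bool),
    (U.foldl stepA st).1.length = st.1.length →
    (U.foldl stepA st).1 = st.1 ∧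
    ∀ arc ∈ U, ¬((deg st.1 arc.1 = 1 ∨ deg st.1 arc.2 = 1) ∧ arc ∈ st.1) := by
  intro U
  induction U with
  | nil => intro st _; exact ⟨rfl, by simp⟩
  | cons arc U ih =>
    intro st h
    simp only [List.foldl_cons] at h ⊢
    have hle := foldA_len_le U (stepA st arc)
    have hle2 := stepA_len_le st arc
    have hmid : (stepA st arc).1.length = st.1.length := by omega
    have hnc : ¬((deg st.1 arc.1 = 1 ∨ deg st.1 arc.2 = 1) ∧ arc ∈ st.1) := by
      rintro ⟨hc, hm⟩
      have : (stepA st arc).1 = st.1.erase arc := by rw [stepA_eq]; simp [hc, hm]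
      rw [this, List.length_erase_of_mem hm] at hmid
      have := List.length_pos_of_mem hm
      omega
    have heq1 : (stepA st arc).1 = st.1 := by
      rw [stepA_eq]
      split_ifs with h1 h2
      · exact absurd ⟨h1, h2⟩ hnc
      · rfl
      · rfl
    rcases ih (stepA st arc) (by rw [heq1]; exact h) with ⟨h1, h2⟩
    refine ⟨by rw [h1, heq1], ?_⟩
    intro a ha
    rcases List.mem_cons.1 ha with rfl | ha
    · exact hnc
    · have := h2 a ha; rw [heq1] at this; exact this

theorem terminal_of_nocond {U r : List (Int × Int)} (hsub : ∀ a ∈ r, a ∈ U)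
    (h : ∀ arc ∈ U, ¬((deg r arc.1 = 1 ∨ deg r arc.2 = 1) ∧ arc ∈ r)) : Terminal r := by
  intro v hv
  rcases deg_pos_mem (by omega : deg r v ≠ 0) with ⟨a, ha, he⟩
  refine h a (hsub a ha) ⟨?_, ha⟩
  rcases he with he | he
  · exact Or.inl (he ▸ hv)
  · exact Or.inr (he ▸ hv)

theorem foldA_of_terminal (U : List (Int × Int)) (r : List (Int × Int)) (ht : Terminal r) :
    U.foldl stepA (r, false) = (r, false) := by
  suffices h : ∀ (V : List (Int × Int)), V.foldl stepA (r, false) = (r, false) from h U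
  intro V
  induction V with
  | nil => rfl
  | cons arc V ih =>
    simp only [List.foldl_cons]
    have : stepA (r, false) arc = (r, false) := by
      rw [stepA_eq]
      have h1 := ht arc.1
      have h2 := ht arc.2
      simp only
      rw [if_neg (by tauto)]
    rw [this, ih]

theorem loopA_spec (U : List (Int × Int)) :
    ∀ (fuel : Nat) (r : List (Int × Int)), (∀ a ∈ r, a ∈ U) → r.length + 2 ≤ fuel →
    Relation.ReflTransGen Step r (buildLoopA U fuel r) ∧ Terminal (buildLoopA U fuel r) := by
  intro fuel
  induction fuel with
  | zero => intro r _ h; omega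
  | succ fuel ih =>
    intro r hsub hfuel
    by_cases hfound : (U.foldl stepA (r, false)).2 = true
    · rw [show buildLoopA U (fuel + 1) r = buildLoopA U fuel (U.foldl stepA (r, false)).1 from
        by simp [buildLoopA, hfound]]
      have hreach : Relation.ReflTransGen Step r (U.foldl stepA (r, false)).1 :=
        foldA_reach U (r, false)
      have hle : (U.foldl stepA (r, false)).1.length ≤ r.length := foldA_len_le U (r, false)
      by_cases hlen : (U.foldl stepA (r, false)).1.length = r.length
      · -- found = true but nothing removed: r is already terminal, the next pass stops
        rcases foldA_frozen U (r, false) hlen with ⟨heq, hnc⟩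
        have ht : Terminal r := terminal_of_nocond hsub hnc
        rw [heq]
        rcases fuel with _ | fuel
        · omega
        · rw [show buildLoopA U (fuel + 1) r = r from by
            simp [buildLoopA, foldA_of_terminal U r ht]]
          exact ⟨Relation.ReflTransGen.refl, ht⟩
      · have hlt : (U.foldl stepA (r, false)).1.length < r.length := lt_of_le_of_ne hle hlen
        have hsub' : ∀ a ∈ (U.foldl stepA (r, false)).1, a ∈ U :=
          fun a ha => hsub a (reach_subset hreach ha)
        rcases ih (U.foldl stepA (r, false)).1 hsub' (by omega) with ⟨h1, h2⟩
        exact ⟨hreach.trans h1, h2⟩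
    · -- found = false: no condition fired, the result is r and r is terminal
      have hf : (U.foldl stepA (r, false)).2 = false := by
        revert hfound; cases (U.foldl stepA (r, false)).2 <;> simp
      rcases foldA_false U (r, false) hf with ⟨heq, hnc⟩
      rw [show buildLoopA U (fuel + 1) r = (U.foldl stepA (r, false)).1 from
        by simp [buildLoopA, hf]]
      rw [show (U.foldl stepA (r, false)).1 = r from by rw [heq]]
      exact ⟨Relation.ReflTransGen.refl,
        terminal_of_nocond hsub (fun arc ha h => (hnc arc ha) h.1)⟩

theorem buildA_spec (U : List (Int × Int)) :
    Relation.ReflTransGen Step U (build_cycle U) ∧ Terminal (build_cycle U) := by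
  unfold build_cycle
  exact loopA_spec U (U.length + 2) U (fun a h => h) le_rfl

-- ---- analysis of port B ----

theorem degOf_getD (r : List (Int × Int)) (v : Int) :
    (degOf r).getD v 0 = (deg r v : Int) := by
  unfold degOf
  suffices h : ∀ (d : PySem.Dict Int Int),
      (r.foldl (fun d a =>
        let d1 := d.insert a.1 (d.getD a.1 0 + 1)
        d1.insert a.2 (d1.getD a.2 0 + 1)) d).getD v 0 = d.getD v 0 + (deg r v : Int) by
    rw [h PySem.Dict.empty]; simp [PySem.Dict.getD_empty]
  induction r with
  | nil => intro d; simp [deg_nil]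
  | cons a t ih =>
    intro d
    obtain ⟨x, y⟩ := a
    simp only [List.foldl_cons]
    rw [ih, deg_cons]
    simp only [PySem.Dict.getD_insert, cont]
    rcases eq_or_ne v y with h2 | h2
    · subst h2
      rcases eq_or_ne v x with h1 | h1
      · subst h1; simp; omega
      · simp [h1, Ne.symm h1]; omega
    · rcases eq_or_ne v x with h1 | h1
      · subst h1; simp [h2, Ne.symm h2]; omega
      · simp [h1, h2, Ne.symm h1, Ne.symm h2]

theorem predB_iff (r : List (Int × Int)) (a : Int × Int) :
    ((degOf r).getD a.1 0 == 1 || (degOf r).getD a.2 0 == 1) = true ↔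
      (deg r a.1 = 1 ∨ deg r a.2 = 1) := by
  simp only [degOf_getD, Bool.or_eq_true, beq_iff_eq]
  constructor
  · rintro (h | h) <;> [left; right] <;> exact_mod_cast h
  · rintro (h | h) <;> [left; right] <;> exact_mod_cast h

theorem loopB_spec : ∀ (fuel : Nat) (r : List (Int × Int)), r.length + 1 ≤ fuel →
    Relation.ReflTransGen Step r (loopB fuel r) ∧ Terminal (loopB fuel r) := by
  intro fuel
  induction fuel with
  | zero => intro r h; omega
  | succ fuel ih =>
    intro r hfuel
    rcases hfind : r.find? (fun a => (degOf r).getD a.1 0 == 1 || (degOf r).getD a.2 0 == 1)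
      with _ | t
    · rw [show loopB (fuel + 1) r = r from by simp [loopB, hfind]]
      refine ⟨Relation.ReflTransGen.refl, ?_⟩
      intro v hv
      rcases deg_pos_mem (by omega : deg r v ≠ 0) with ⟨a, ha, he⟩
      have hp := List.find?_eq_none.1 hfind a ha
      simp only [] at hp
      apply hp
      rw [predB_iff]
      rcases he with he | he
      · exact Or.inl (he ▸ hv)
      · exact Or.inr (he ▸ hv)
    · rw [show loopB (fuel + 1) r = loopB fuel (r.erase t) from by simp [loopB, hfind]]
      have hmem : t ∈ r := List.mem_of_find?_eq_some hfind
      have hp := List.find?_some hfind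
      simp only [] at hp
      have hcond : (deg r t.1 = 1 ∨ deg r t.2 = 1) := (predB_iff r t).1 hp
      have hstep : Step r (r.erase t) := ⟨t, hmem, hcond, rfl⟩
      have hlen : (r.erase t).length + 1 = r.length := step_length hstep
      rcases ih (r.erase t) (by omega) with ⟨h1, h2⟩
      exact ⟨Relation.ReflTransGen.head hstep h1, h2⟩

theorem buildB_spec (U : List (Int × Int)) :
    Relation.ReflTransGen Step U (build_cycle_alt U) ∧ Terminal (build_cycle_alt U) := by
  unfold build_cycle_alt
  exact loopB_spec (U.length + 1) U le_rfl

-- ===== VERDICT (by name: the statement is the Claim_ definition above) =====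
theorem build_cycle_spec : Claim_equal_build_cycle := by
  intro U _
  unfold Spec_build_cycle
  rcases buildA_spec U with ⟨ra, ta⟩
  rcases buildB_spec U with ⟨rb, tb⟩
  exact nf_unique ra rb ta tb
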